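-- pv_equiv track=rewrite | github.com/adamgunderson/JuniperVersionMonitor | JuniperVersionMonitor.py | check_eol_status
-- ===== SOURCE A (Python) =====
-- def parse_version(version):
--     # Split version into main parts and potential service pack
--     main_parts = version.split('-')[0]
--     service_pack = version.split('-')[1] if '-' in version else ''
--
--     # Parse main version parts
--     parts = main_parts.replace('R', '.').split('.')
--     parsed = [int(p) if p.isdigit() else p for p in parts]
--
--     # Parse service pack if present
--     if service_pack:
--         sp_parts = service_pack.replace('S', '.').split('.')
--         parsed.extend([int(p) if p.isdigit() else p for p in sp_parts])
--
--     return parsed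
--
-- def check_eol_status(device_version, eol_data):
--     eol_date = None
--     most_specific_length = 0
--     device_parts = parse_version(device_version)
--     for version, date in eol_data.items():
--         eol_parts = parse_version(version)
--         if len(eol_parts) <= len(device_parts) and all(dp == ep for dp, ep in zip(device_parts, eol_parts)):
--             if len(eol_parts) > most_specific_length:
--                 eol_date = date
--                 most_specific_length = len(eol_parts)
--     return eol_date
-- ===== SOURCE B (Python) =====
-- def parse_version(version):
--     # Split version into main parts and potential service pack
--     main_parts = version.split('-')[0]
--     service_pack = version.split('-')[1] if '-' in version else ''
--
--     # Parse main version parts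
--     parts = main_parts.replace('R', '.').split('.')
--     parsed = [int(p) if p.isdigit() else p for p in parts]
--
--     # Parse service pack if present
--     if service_pack:
--         sp_parts = service_pack.replace('S', '.').split('.')
--         parsed.extend([int(p) if p.isdigit() else p for p in sp_parts])
--
--     return parsed
--
-- def check_eol_status(device_version, eol_data):
--     # Index the EOL versions once by their parsed tuple (first occurrence wins),
--     # then probe the device version's prefixes from longest to shortest.
--     index = {}
--     for version, date in eol_data.items():
--         key = tuple(parse_version(version))
--         if key not in index:
--             index[key] = date
--     device_parts = parse_version(device_version)
--     for length in range(len(device_parts), 0, -1):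
--         date = index.get(tuple(device_parts[:length]))
--         if date is not None:
--             return date
--     return None
-- ===== Notes on version B (the rewrite author's own statement) =====
-- stated objective: alternative
-- what changed: Instead of parsing every EOL version and prefix-comparing it against the device version while tracking the longest match, B builds a dict keyed by parsed version tuple once (first occurrence wins) and probes the device version's parsed prefixes from longest to shortest, returning on the first hit; per-entry prefix comparisons become O(1) expected hash lookups, though parsing dominates, so a timing run read only ~1.5x.
import Mathlib
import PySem

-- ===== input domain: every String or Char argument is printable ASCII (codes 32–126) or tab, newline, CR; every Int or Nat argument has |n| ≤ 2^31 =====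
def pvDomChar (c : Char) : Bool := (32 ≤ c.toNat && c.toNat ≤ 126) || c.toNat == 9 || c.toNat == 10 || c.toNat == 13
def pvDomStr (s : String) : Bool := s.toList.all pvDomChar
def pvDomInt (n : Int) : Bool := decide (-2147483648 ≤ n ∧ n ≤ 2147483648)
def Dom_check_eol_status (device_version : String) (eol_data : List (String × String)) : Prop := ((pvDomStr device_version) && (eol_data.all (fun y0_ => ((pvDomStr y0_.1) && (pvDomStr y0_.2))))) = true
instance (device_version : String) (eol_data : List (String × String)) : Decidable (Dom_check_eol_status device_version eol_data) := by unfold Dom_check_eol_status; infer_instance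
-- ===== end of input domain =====

-- B replaces A's per-entry prefix scan by a parsed-tuple → date index probed on the
-- device version's prefixes longest-first (alternative algorithm; same answer on every input).


-- A Python parsed version part: int(p) if p.isdigit() else the string p.
inductive VPart
  | int : Int → VPart
  | str : String → VPart
deriving DecidableEq, Repr

-- shared module helper parse_version (used verbatim by A and by B, like in Python)
def parse_part (p : String) : VPart :=
  -- int(p) is guarded by p.isdigit(), where ofStr? is `some`; the .getD 0 default is never used
  if PySem.Str.strIsdigit p then VPart.int ((PySem.Int.ofStr? p).getD 0) else VPart.str p

-- version.split(sep) with the nonempty separators '-', '.': split? is `some` there, .getD [] is unreachable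
def pySplit (s sep : String) : List String := (PySem.Str.split? s sep).getD []

def parse_version (version : String) : List VPart :=
  -- version.split('-')[0]: split's result is never empty, so the .getD "" defaults are unreachable
  let main_parts := (pySplit version "-").getD 0 ""
  let service_pack := if PySem.Str.isIn "-" version then (pySplit version "-").getD 1 "" else ""
  let parsed := (pySplit (PySem.Str.replace main_parts "R" ".") ".").map parse_part
  if service_pack ≠ "" then
    parsed ++ (pySplit (PySem.Str.replace service_pack "S" ".") ".").map parse_part
  else parsed

-- ===== PORT A =====
-- eol_data is a Python dict: its association list is normalized as dict construction does
-- (first position, last value) before iterating .items(), in both ports alike.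
def check_eol_status (device_version : String) (eol_data : List (String × String)) : Option String :=
  let device_parts := parse_version device_version
  let r := (PySem.Dict.ofList eol_data).items.foldl
    (fun (st : Option String × Nat) vd =>
      let eol_parts := parse_version vd.1
      if eol_parts.length ≤ device_parts.length ∧
         (device_parts.zip eol_parts).all (fun q => q.1 == q.2) = true then
        if eol_parts.length > st.2 then (some vd.2, eol_parts.length) else st
      else st)
    (none, 0)
  r.1

-- ===== PORT B =====
-- for length in range(len(device_parts), 0, -1): probe index and return on first hit
def probe_loop (index : PySem.Dict (List VPart) String) (device_parts : List VPart) : Nat → Option String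
  | 0 => none
  | l + 1 =>
    match index.get? (device_parts.take (l + 1)) with
    | some date => some date
    | none => probe_loop index device_parts l

def check_eol_status_alt (device_version : String) (eol_data : List (String × String)) : Option String :=
  let index := (PySem.Dict.ofList eol_data).items.foldl
    (fun (d : PySem.Dict (List VPart) String) vd =>
      let key := parse_version vd.1
      if d.contains key then d else d.insert key vd.2)
    PySem.Dict.empty
  let device_parts := parse_version device_version
  probe_loop index device_parts device_parts.length

-- ===== PRECONDITION & SPEC =====
def Spec_check_eol_status (device_version : String) (eol_data : List (String × String)) (out : Option String) : Prop := out = check_eol_status_alt device_version eol_data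
instance (device_version : String) (eol_data : List (String × String)) (out : Option String) : Decidable (Spec_check_eol_status device_version eol_data out) := by unfold Spec_check_eol_status; infer_instance

-- ===== CLAIM (what is proved, stated in full; the proofs are below) =====
def Claim_equal_check_eol_status : Prop := ∀ (device_version : String) (eol_data : List (String × String)), Dom_check_eol_status device_version eol_data → Spec_check_eol_status device_version eol_data (check_eol_status device_version eol_data)

-- ===== LEMMAS AND PROOFS =====

-- date of the first entry of l whose version parses to k
def firstAt (l : List (String × String)) (k : List VPart) : Option String :=
  (l.find? (fun vd => parse_version vd.1 == k)).map (·.2)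

-- A's per-entry condition is exactly "the parsed entry is a prefix of the device parts"
theorem amatch_iff (dp ep : List VPart) :
    (ep.length ≤ dp.length ∧ (dp.zip ep).all (fun q => q.1 == q.2) = true) ↔ dp.take ep.length = ep := by
  induction ep generalizing dp with
  | nil => simp
  | cons e es ih =>
    cases dp with
    | nil => simp
    | cons d ds =>
      simp only [List.length_cons, List.zip_cons_cons, List.all_cons, List.take_succ_cons,
        Bool.and_eq_true, beq_iff_eq, List.cons.injEq]
      rw [← ih ds]
      constructor
      · rintro ⟨h1, h2, h3⟩; exact ⟨h2, by omega, h3⟩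
      · rintro ⟨h1, h2, h3⟩; exact ⟨by omega, h1, h3⟩

theorem firstAt_append_singleton (l : List (String × String)) (vd : String × String) (k : List VPart) :
    firstAt (l ++ [vd]) k =
      match firstAt l k with
      | some v => some v
      | none => if parse_version vd.1 = k then some vd.2 else none := by
  simp only [firstAt, List.find?_append]
  cases h : l.find? (fun vd => parse_version vd.1 == k) with
  | some v => simp
  | none =>
    by_cases hk : parse_version vd.1 = k <;> simp [hk]

-- the invariant A's loop maintains for its (date, best length) state
def Good (dp : List VPart) (l : List (String × String)) (st : Option String × Nat) : Prop :=
  st.2 ≤ dp.length ∧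
  (st.2 = 0 → st.1 = none) ∧
  (0 < st.2 → st.1 = firstAt l (dp.take st.2) ∧ (firstAt l (dp.take st.2)).isSome) ∧
  (∀ j, st.2 < j → j ≤ dp.length → firstAt l (dp.take j) = none)

def astep (dp : List VPart) (st : Option String × Nat) (vd : String × String) : Option String × Nat :=
  let eol_parts := parse_version vd.1
  if eol_parts.length ≤ dp.length ∧ (dp.zip eol_parts).all (fun q => q.1 == q.2) = true then
    if eol_parts.length > st.2 then (some vd.2, eol_parts.length) else st
  else st

theorem good_step (dp : List VPart) (l : List (String × String)) (st : Option String × Nat)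
    (vd : String × String) (h : Good dp l st) : Good dp (l ++ [vd]) (astep dp st vd) := by
  obtain ⟨h1, h2, h3, h4⟩ := h
  unfold astep
  set ep := parse_version vd.1 with hep
  by_cases hc : ep.length ≤ dp.length ∧ (dp.zip ep).all (fun q => q.1 == q.2) = true
  · have hpre : dp.take ep.length = ep := (amatch_iff dp ep).mp hc
    simp only [if_pos hc]
    by_cases hgt : ep.length > st.2
    · simp only [if_pos hgt]
      refine ⟨hc.1, by omega, ?_, ?_⟩
      · intro _
        have hnone : firstAt l (dp.take ep.length) = none := h4 _ hgt hc.1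
        rw [firstAt_append_singleton, hnone, hpre, if_pos rfl]
        exact ⟨rfl, rfl⟩
      · intro j hj1 hj2
        have hnone : firstAt l (dp.take j) = none := h4 _ (by omega) hj2
        rw [firstAt_append_singleton, hnone]
        have : ep ≠ dp.take j := by
          intro he
          have : ep.length = j := by rw [he, List.length_take]; omega
          omega
        rw [if_neg this]
    · simp only [if_neg hgt]
      refine ⟨h1, h2, ?_, ?_⟩
      · intro hpos
        obtain ⟨ha, hb⟩ := h3 hpos
        cases hf : firstAt l (dp.take st.2) with
        | some v => rw [firstAt_append_singleton, hf]; exact ⟨by rw [ha, hf], rfl⟩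
        | none => rw [hf] at hb; simp at hb
      · intro j hj1 hj2
        have hnone : firstAt l (dp.take j) = none := h4 _ hj1 hj2
        rw [firstAt_append_singleton, hnone]
        have : ep ≠ dp.take j := by
          intro he
          have : ep.length = j := by rw [he, List.length_take]; omega
          omega
        rw [if_neg this]
  · simp only [if_neg hc]
    refine ⟨h1, h2, ?_, ?_⟩
    · intro hpos
      obtain ⟨ha, hb⟩ := h3 hpos
      cases hf : firstAt l (dp.take st.2) with
      | some v => rw [firstAt_append_singleton, hf]; exact ⟨by rw [ha, hf], rfl⟩
      | none => rw [hf] at hb; simp at hb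
    · intro j hj1 hj2
      have hnone : firstAt l (dp.take j) = none := h4 _ hj1 hj2
      rw [firstAt_append_singleton, hnone]
      have : ¬ parse_version vd.1 = dp.take j := by
        intro he
        apply hc
        apply (amatch_iff dp (parse_version vd.1)).mpr
        have hlen : (parse_version vd.1).length = j := by rw [he, List.length_take]; omega
        rw [hlen, he]
      rw [if_neg this]

theorem good_foldl (dp : List VPart) (l : List (String × String)) :
    Good dp l (l.foldl (astep dp) (none, 0)) := by
  induction l using List.reverseRecOn with
  | nil =>
    refine ⟨by simp, fun _ => rfl, fun h => absurd h (by simp), fun j _ _ => rfl⟩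
  | append_singleton l vd ih =>
    rw [List.foldl_append, List.foldl_cons, List.foldl_nil]
    exact good_step dp l _ vd ih

-- B's index lookup is "date of the first entry parsing to the key"
def bstep (d : PySem.Dict (List VPart) String) (vd : String × String) : PySem.Dict (List VPart) String :=
  if d.contains (parse_version vd.1) then d else d.insert (parse_version vd.1) vd.2

theorem bfold_get? (l : List (String × String)) :
    ∀ (d : PySem.Dict (List VPart) String) (k : List VPart),
      (l.foldl bstep d).get? k =
        match d.get? k with
        | some v => some v
        | none => firstAt l k := by
  induction l with
  | nil => intro d k; cases h : d.get? k <;> simp [h, firstAt]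
  | cons vd rest ih =>
    intro d k
    rw [List.foldl_cons]
    have hfa : firstAt (vd :: rest) k =
        if parse_version vd.1 = k then some vd.2 else firstAt rest k := by
      simp only [firstAt, List.find?_cons]
      by_cases hk : parse_version vd.1 = k
      · have hb : (parse_version vd.1 == k) = true := by simp [hk]
        simp [hk]
      · have hb : (parse_version vd.1 == k) = false := by simp [hk]
        simp [hb, hk]
    show (List.foldl bstep (bstep d vd) rest).get? k = _
    by_cases hc : d.contains (parse_version vd.1)
    · have hstep : bstep d vd = d := by unfold bstep; rw [if_pos hc]
      rw [hstep, ih]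
      cases hdk : d.get? k with
      | some v => rfl
      | none =>
        rw [hfa]
        have : ¬ parse_version vd.1 = k := by
          intro he
          rw [he] at hc
          rw [PySem.Dict.contains_eq_isSome_get?, hdk] at hc
          simp at hc
        rw [if_neg this]
    · have hstep : bstep d vd = d.insert (parse_version vd.1) vd.2 := by unfold bstep; rw [if_neg hc]
      rw [hstep, ih]
      by_cases hk : parse_version vd.1 = k
      · subst hk
        rw [PySem.Dict.get?_insert_self]
        have hdk : d.get? (parse_version vd.1) = none := by
          rw [PySem.Dict.contains_eq_isSome_get?] at hc
          cases h : d.get? (parse_version vd.1) with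
          | none => rfl
          | some v => rw [h] at hc; simp at hc
        rw [hdk, hfa, if_pos rfl]
      · rw [PySem.Dict.get?_insert_of_ne _ _ (Ne.symm hk)]
        cases hdk : d.get? k with
        | some v => rfl
        | none => rw [hfa, if_neg hk]

-- the probe loop reads the invariant's answer
theorem probe_of_good (dp : List VPart) (l : List (String × String))
    (index : PySem.Dict (List VPart) String)
    (hidx : ∀ k, index.get? k = firstAt l k)
    (st : Option String × Nat) (h : Good dp l st) :
    ∀ L, st.2 ≤ L → L ≤ dp.length → probe_loop index dp L = st.1 := by
  obtain ⟨h1, h2, h3, h4⟩ := h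
  intro L
  induction L with
  | zero =>
    intro hL _
    have : st.2 = 0 := by omega
    rw [h2 this]
    rfl
  | succ l' ih =>
    intro hL hLn
    unfold probe_loop
    rw [hidx]
    by_cases he : st.2 = l' + 1
    · obtain ⟨ha, hb⟩ := h3 (by omega)
      rw [← he]
      cases hf : firstAt l (dp.take st.2) with
      | some v => rw [hf] at ha; rw [ha]
      | none => rw [hf] at hb; simp at hb
    · have hnone : firstAt l (dp.take (l' + 1)) = none := h4 _ (by omega) hLn
      rw [hnone]
      exact ih (by omega) (by omega)

-- ===== VERDICT (by name: the statement is the Claim_ definition above) =====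
theorem check_eol_status_spec : Claim_equal_check_eol_status := by
  intro device_version eol_data _
  unfold Spec_check_eol_status check_eol_status check_eol_status_alt
  set dp := parse_version device_version with hdp
  set items := (PySem.Dict.ofList eol_data).items with hitems
  have hgood : Good dp items (items.foldl (astep dp) (none, 0)) := good_foldl dp items
  have hidx : ∀ k, (items.foldl bstep PySem.Dict.empty).get? k = firstAt items k := by
    intro k
    rw [bfold_get? items PySem.Dict.empty k]
    rfl
  have hmain := probe_of_good dp items (items.foldl bstep PySem.Dict.empty) hidx _ hgood dp.length
    hgood.1 (le_refl _)
  show (items.foldl (astep dp) (none, 0)).1 = probe_loop (items.foldl bstep PySem.Dict.empty) dp dp.length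
  exact hmain.symm
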